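-- pv_equiv track=rewrite | github.com/Ap01lo/MapReduce-MultiHash | cleanCode/hash.py | bitMap
-- ===== SOURCE A (Python) =====
-- def bitMap(buckets,support):
--     bitmap = 0
--     for bucket in buckets:
--         if len(bucket) >= int(support):
--             # 比置信度大，置1左移
--             bitmap += 1
--             bitmap <<= 1
--         else:
--             # 比置信度小，置0左移
--             bitmap <<= 1
--     bitmap >>= 1
--     return bitmap
-- ===== SOURCE B (Python) =====
-- def bitMap(buckets, support):
--     bits = ''.join('1' if len(b) >= int(support) else '0' for b in buckets)
--     return int(bits, 2) if bits else 0
-- ===== Notes on version B (the rewrite author's own statement) =====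
-- stated objective: idiomatic
-- what changed: Builds the whole bit string MSB-first and converts it once with int(bits, 2) instead of shifting an accumulator on every iteration and undoing the final shift.
import Mathlib
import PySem

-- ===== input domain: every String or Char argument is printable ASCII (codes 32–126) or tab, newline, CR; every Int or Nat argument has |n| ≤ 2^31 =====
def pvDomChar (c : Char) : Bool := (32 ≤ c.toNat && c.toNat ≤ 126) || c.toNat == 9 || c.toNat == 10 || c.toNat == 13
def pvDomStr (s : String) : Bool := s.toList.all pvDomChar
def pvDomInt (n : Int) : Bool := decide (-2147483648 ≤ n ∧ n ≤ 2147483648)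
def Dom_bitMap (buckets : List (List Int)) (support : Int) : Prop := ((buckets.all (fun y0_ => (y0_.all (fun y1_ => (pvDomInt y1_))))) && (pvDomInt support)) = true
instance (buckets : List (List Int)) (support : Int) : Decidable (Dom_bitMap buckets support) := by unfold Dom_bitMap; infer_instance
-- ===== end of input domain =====

-- ===== PORT A =====
-- A: shift-accumulate fold — bitmap += 1 / bitmap <<= 1 per bucket, final >> 1.
-- (support is already Int here, so Python's int(support) is the identity.)
def bitMap (buckets : List (List Int)) (support : Int) : Int :=
  PySem.Int.floordiv
    (buckets.foldl (fun bitmap bucket =>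
      if (bucket.length : Int) ≥ support then (bitmap + 1) * 2 else bitmap * 2) 0)
    2

-- ===== PORT B =====
-- B: build the bit string MSB-first, then one base-2 conversion (int(bits, 2); 0 if empty).
def bitMap_alt (buckets : List (List Int)) (support : Int) : Int :=
  let bits : List Char :=
    buckets.map (fun b => if (b.length : Int) ≥ support then '1' else '0')
  if bits.isEmpty then 0
  else bits.foldl (fun acc c => acc * 2 + (if c = '1' then 1 else 0)) 0

-- ===== PRECONDITION & SPEC =====
def Spec_bitMap (buckets : List (List Int)) (support : Int) (out : Int) : Prop := out = bitMap_alt buckets support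
instance (buckets : List (List Int)) (support : Int) (out : Int) : Decidable (Spec_bitMap buckets support out) := by unfold Spec_bitMap; infer_instance

-- ===== CLAIM (what is proved, stated in full; the proofs are below) =====
def Claim_equal_bitMap : Prop := ∀ (buckets : List (List Int)) (support : Int), Dom_bitMap buckets support → Spec_bitMap buckets support (bitMap buckets support)

-- ===== LEMMAS AND PROOFS =====
-- Invariant: A's accumulator stays twice B's accumulator (A shifts AFTER adding the bit,
-- B shifts BEFORE adding it), so A's final >>1 lands exactly on B's value.
theorem bitMap_fold_inv (buckets : List (List Int)) (support : Int) (b : Int) :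
    buckets.foldl (fun bitmap bucket =>
        if (bucket.length : Int) ≥ support then (bitmap + 1) * 2 else bitmap * 2) (2 * b)
      = 2 * ((buckets.map (fun bk => if (bk.length : Int) ≥ support then '1' else '0')).foldl
              (fun acc c => acc * 2 + (if c = '1' then 1 else 0)) b) := by
  induction buckets generalizing b with
  | nil => rfl
  | cons hd tl ih =>
    simp only [List.foldl_cons, List.map_cons]
    by_cases h : (hd.length : Int) ≥ support
    · simpa [h, two_mul, mul_comm, mul_add] using ih (b * 2 + 1)
    · simpa [h, mul_comm] using ih (b * 2)

-- ===== VERDICT (by name: the statement is the Claim_ definition above) =====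
theorem bitMap_spec : Claim_equal_bitMap := by
  intro buckets support _
  unfold Spec_bitMap bitMap bitMap_alt
  cases buckets with
  | nil => rfl
  | cons hd tl =>
    have h := bitMap_fold_inv (hd :: tl) support 0
    simp only [mul_zero] at h
    rw [h]
    have h2 : (0:Int) < 2 := by norm_num
    rw [PySem.Int.floordiv_eq_ediv_of_pos h2]
    simp [List.isEmpty]
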